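-- pv_equiv track=rewrite | github.com/pmy0721/mekey-lightning | python-sidecar/src/transcribe_service.py | _drop_compact_prefix
-- ===== SOURCE A (Python) =====
-- def _drop_compact_prefix(text: str, compact_len: int) -> str:
--     consumed = 0
--     for i, ch in enumerate(text):
--         if not ch.isspace():
--             consumed += 1
--         if consumed >= compact_len:
--             return text[i + 1 :]
--     return ""
-- ===== SOURCE B (Python) =====
-- import itertools
-- import bisect
--
--
-- def _drop_compact_prefix(text: str, compact_len: int) -> str:
--     counts = list(itertools.accumulate(0 if ch.isspace() else 1 for ch in text))
--     i = bisect.bisect_left(counts, compact_len)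
--     if i == len(counts):
--         return ""
--     return text[i + 1:]
-- ===== Notes on version B (the rewrite author's own statement) =====
-- stated objective: alternative
-- what changed: Replaces A's single early-return scan with a two-phase strategy: build a prefix table of cumulative non-space counts (itertools.accumulate), then binary-search it (bisect_left) for the first index reaching compact_len and slice there.
import Mathlib
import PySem

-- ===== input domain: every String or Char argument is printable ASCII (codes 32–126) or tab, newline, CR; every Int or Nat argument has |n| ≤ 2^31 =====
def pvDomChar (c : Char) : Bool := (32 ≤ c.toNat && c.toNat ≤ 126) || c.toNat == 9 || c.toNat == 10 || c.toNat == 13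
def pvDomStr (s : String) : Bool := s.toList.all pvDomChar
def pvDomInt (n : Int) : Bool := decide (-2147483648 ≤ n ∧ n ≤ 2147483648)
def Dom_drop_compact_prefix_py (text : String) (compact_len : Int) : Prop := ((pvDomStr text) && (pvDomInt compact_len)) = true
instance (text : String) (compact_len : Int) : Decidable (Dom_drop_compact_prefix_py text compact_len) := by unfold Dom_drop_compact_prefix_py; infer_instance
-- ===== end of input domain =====

-- B replaces A's single early-return scan by a prefix table of cumulative non-space
-- counts plus a binary search (bisect_left) for the cutoff index (objective: alternative).


-- ===== PORT A =====
-- the 'for i, ch in enumerate(text)' loop, carrying 'consumed'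
def dropA_loop (text : String) (compact_len : Int) : List (Int × Char) → Int → String
  | [], _ => ""
  | (i, ch) :: rest, consumed =>
      let consumed := if !(PySem.Chars.isspace ch) then consumed + 1 else consumed
      if compact_len ≤ consumed then PySem.Str.slice text (some (i + 1)) none
      else dropA_loop text compact_len rest consumed

def drop_compact_prefix_py (text : String) (compact_len : Int) : String :=
  dropA_loop text compact_len (PySem.List.enumerate text.toList 0) 0

-- ===== PORT B =====
-- itertools.accumulate(0 if ch.isspace() else 1 for ch in text)
def accumCounts : List Char → Int → List Int
  | [], _ => []
  | ch :: rest, acc =>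
      let acc := acc + (if PySem.Chars.isspace ch then 0 else 1)
      acc :: accumCounts rest acc

def drop_compact_prefix_py_alt (text : String) (compact_len : Int) : String :=
  let counts := accumCounts text.toList 0
  let i := PySem.List.bisectLeft counts compact_len
  if i = counts.length then ""
  else PySem.Str.slice text (some ((i : Int) + 1)) none

-- ===== PRECONDITION & SPEC =====
def Spec_drop_compact_prefix_py (text : String) (compact_len : Int) (out : String) : Prop := out = drop_compact_prefix_py_alt text compact_len
instance (text : String) (compact_len : Int) (out : String) : Decidable (Spec_drop_compact_prefix_py text compact_len out) := by unfold Spec_drop_compact_prefix_py; infer_instance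

-- ===== CLAIM (what is proved, stated in full; the proofs are below) =====
def Claim_equal_drop_compact_prefix_py : Prop := ∀ (text : String) (compact_len : Int), Dom_drop_compact_prefix_py text compact_len → Spec_drop_compact_prefix_py text compact_len (drop_compact_prefix_py text compact_len)

-- ===== LEMMAS AND PROOFS =====

-- every entry of the running count list is ≥ the starting accumulator
theorem accumCounts_ge (cs : List Char) (c : Int) :
    ∀ x ∈ accumCounts cs c, c ≤ x := by
  induction cs generalizing c with
  | nil => intro x hx; simp [accumCounts] at hx
  | cons ch rest ih =>
    intro x hx
    simp only [accumCounts, List.mem_cons] at hx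
    rcases hx with h | h
    · subst h; split <;> omega
    · have := ih _ _ h; split_ifs at this <;> omega

-- the prefix-count table is nondecreasing
theorem accumCounts_mono (cs : List Char) (c : Int) :
    (accumCounts cs c).Pairwise (· ≤ ·) := by
  induction cs generalizing c with
  | nil => simp [accumCounts]
  | cons ch rest ih =>
    simp only [accumCounts, List.pairwise_cons]
    exact ⟨fun x hx => accumCounts_ge _ _ x hx, ih _⟩

-- A's loop returns the slice at the FIRST index where the running count reaches compact_len
theorem dropA_loop_eq_findIdx? (text : String) (k : Int) (cs : List Char) :
    ∀ (s : Nat) (c : Int),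
    dropA_loop text k (PySem.List.enumerate cs (s : Int)) c =
      match (accumCounts cs c).findIdx? (fun v => decide (k ≤ v)) with
      | some j => PySem.Str.slice text (some (((s + j : Nat) : Int) + 1)) none
      | none => "" := by
  induction cs with
  | nil => intro s c; simp [PySem.List.enumerate_nil, dropA_loop, accumCounts]
  | cons ch rest ih =>
    intro s c
    rw [PySem.List.enumerate_cons]
    have hstep : (if !(PySem.Chars.isspace ch) then c + 1 else c)
        = c + (if PySem.Chars.isspace ch then 0 else 1) := by
      cases h : PySem.Chars.isspace ch <;> simp
    simp only [dropA_loop, accumCounts, List.findIdx?_cons, hstep]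
    by_cases hk : k ≤ c + (if PySem.Chars.isspace ch then 0 else 1)
    · simp [hk]
    · have hcast : ((s : Int) + 1) = ((s + 1 : Nat) : Int) := by push_cast; ring
      rw [hcast, ih (s + 1) (c + (if PySem.Chars.isspace ch then 0 else 1))]
      simp only [hk, decide_false, Bool.false_eq_true, if_false]
      cases hf : (accumCounts rest (c + (if PySem.Chars.isspace ch then 0 else 1))).findIdx?
          (fun v => decide (k ≤ v)) with
      | none => simp
      | some j =>
        simp only [Option.map_some]
        have : s + 1 + j = s + (j + 1) := by omega
        rw [this]

-- on the nondecreasing table, bisect_left finds the same first index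
theorem bisectLeft_eq_findIdx (counts : List Int) (k : Int)
    (hmono : counts.Pairwise (· ≤ ·)) :
    (match counts.findIdx? (fun v => decide (k ≤ v)) with
      | some j => PySem.List.bisectLeft counts k = j ∧ j < counts.length
      | none => PySem.List.bisectLeft counts k = counts.length) := by
  obtain ⟨hle, hlt, hge⟩ := PySem.List.bisectLeft_spec counts k hmono
  cases hf : counts.findIdx? (fun v => decide (k ≤ v)) with
  | none =>
    rw [List.findIdx?_eq_none_iff] at hf
    by_contra hne
    have hlt' : PySem.List.bisectLeft counts k < counts.length := by omega
    have := hge _ hlt' (le_refl _)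
    have := hf _ (counts.getElem_mem hlt')
    simp at this; omega
  | some j =>
    rw [List.findIdx?_eq_some_iff_getElem] at hf
    obtain ⟨hj, hpj, hmin⟩ := hf
    refine ⟨?_, hj⟩
    simp only [decide_eq_true_eq] at hpj
    by_contra hne
    rcases Nat.lt_or_ge (PySem.List.bisectLeft counts k) j with h | h
    · -- bisect index < j, so counts[bisect] ≥ k, contradicting minimality of j
      have hb : PySem.List.bisectLeft counts k < counts.length := by omega
      have := hge _ hb (le_refl _)
      have := hmin _ h
      simp at this; omega
    · -- j < bisect index, so counts[j] < k, contradicting counts[j] ≥ k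
      have hjb : j < PySem.List.bisectLeft counts k := by omega
      have := hlt j hj hjb
      omega

-- ===== VERDICT (by name: the statement is the Claim_ definition above) =====
theorem drop_compact_prefix_py_spec : Claim_equal_drop_compact_prefix_py := by
  intro text k _
  unfold Spec_drop_compact_prefix_py drop_compact_prefix_py drop_compact_prefix_py_alt
  have hA := dropA_loop_eq_findIdx? text k text.toList 0 0
  simp only [Nat.cast_zero, Nat.zero_add] at hA
  rw [hA]
  have hb := bisectLeft_eq_findIdx (accumCounts text.toList 0) k (accumCounts_mono _ _)
  cases hf : (accumCounts text.toList 0).findIdx? (fun v => decide (k ≤ v)) with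
  | none =>
    rw [hf] at hb
    simp [hb]
  | some j =>
    rw [hf] at hb
    obtain ⟨hbe, hjl⟩ := hb
    have hne : ¬ (PySem.List.bisectLeft (accumCounts text.toList 0) k
        = (accumCounts text.toList 0).length) := by omega
    simp only [hbe, if_neg (hbe ▸ hne)]
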